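-- pv_equiv track=rewrite | github.com/oss-esso/OQI-UC002-DWave | Benchmarks/decomposition_scaling/benchmark_decomposition_scaling.py | partition_multilevel
-- ===== SOURCE A (Python) =====
-- from typing import Dict, List, Tuple, Set
--
-- def partition_multilevel(farm_names: List[str], food_names: List[str],
--                          group_size: int = 5) -> List[Set[str]]:
--     """Group farms into clusters of *group_size*."""
--     parts = []
--     for i in range(0, len(farm_names), group_size):
--         group = farm_names[i:i + group_size]
--         parts.append({f"Y_{f}_{c}" for f in group for c in food_names})
--     parts.append({f"U_{c}" for c in food_names})
--     return parts
-- ===== SOURCE B (Python) =====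
-- def partition_multilevel(farm_names, food_names, group_size=5):
--     """Group farms into clusters of *group_size*: one pass with a running group."""
--     parts = []
--     current = []
--     for f in farm_names:
--         current.append(f)
--         if len(current) == group_size:
--             parts.append({f"Y_{x}_{c}" for x in current for c in food_names})
--             current = []
--     if current:
--         parts.append({f"Y_{x}_{c}" for x in current for c in food_names})
--     parts.append({f"U_{c}" for c in food_names})
--     return parts
-- ===== Notes on version B (the rewrite author's own statement) =====
-- stated objective: alternative
-- what changed: replaces the index-range loop with slicing (range(0, len, group_size) plus farm_names[i:i+group_size]) by a single pass over the farms that accumulates a running group and flushes it whenever it is full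
-- outside the precondition, e.g. on partition_multilevel(['a'], ['x'], -1): A returns [{'U_x'}], B returns [{'Y_a_x'}, {'U_x'}]; on partition_multilevel(['a'], ['x'], 0): A raises ValueError, B returns [{'Y_a_x'}, {'U_x'}]
import Mathlib
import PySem

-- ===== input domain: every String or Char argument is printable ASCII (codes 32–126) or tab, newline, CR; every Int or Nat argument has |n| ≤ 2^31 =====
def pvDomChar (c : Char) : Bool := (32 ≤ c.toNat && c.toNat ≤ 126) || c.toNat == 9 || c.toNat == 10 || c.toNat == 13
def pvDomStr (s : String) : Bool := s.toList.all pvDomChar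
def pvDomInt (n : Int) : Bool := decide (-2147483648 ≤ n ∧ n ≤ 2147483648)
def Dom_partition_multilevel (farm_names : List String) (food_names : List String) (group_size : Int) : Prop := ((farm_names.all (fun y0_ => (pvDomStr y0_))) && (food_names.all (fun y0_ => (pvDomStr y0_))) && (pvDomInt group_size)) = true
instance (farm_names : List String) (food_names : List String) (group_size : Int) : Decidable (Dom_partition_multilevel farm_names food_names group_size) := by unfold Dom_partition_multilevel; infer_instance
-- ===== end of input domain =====

-- B replaces A's index-range slicing loop by a single accumulating pass over the farms (alternative decomposition, same cost).


-- shared comprehension helpers (the set comprehensions are textually identical in both Pythons)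
-- {f"Y_{f}_{c}" for f in group for c in food_names}
def pvYGroup (food_names : List String) (group : List String) : List String :=
  PySem.Set.ofList (group.flatMap (fun f => food_names.map (fun c => "Y_" ++ f ++ "_" ++ c)))

-- {f"U_{c}" for c in food_names}
def pvUSet (food_names : List String) : List String :=
  PySem.Set.ofList (food_names.map (fun c => "U_" ++ c))

-- ===== PORT A =====
def partition_multilevel (farm_names : List String) (food_names : List String) (group_size : Int) : List (List String) :=
  ((PySem.List.pyRange 0 (farm_names.length : Int) group_size).foldl
      (fun parts i =>
        parts ++ [pvYGroup food_names (PySem.List.slice farm_names (some i) (some (i + group_size)))])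
      ([] : List (List String)))
    ++ [pvUSet food_names]

-- ===== PORT B =====
def partition_multilevel_alt (farm_names : List String) (food_names : List String) (group_size : Int) : List (List String) :=
  let st := farm_names.foldl
    (fun (st : List (List String) × List String) f =>
      let current := st.2 ++ [f]
      if (current.length : Int) = group_size then (st.1 ++ [pvYGroup food_names current], ([] : List String))
      else (st.1, current))
    (([] : List (List String)), ([] : List String))
  (if st.2.isEmpty then st.1 else st.1 ++ [pvYGroup food_names st.2]) ++ [pvUSet food_names]

-- ===== PRECONDITION & SPEC =====
-- Pre_ restricts to positive group_size, the task's natural domain: at group_size = 0 A raises ValueError,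
-- and for negative group_size A silently drops every farm (an artefact of range's negative-step semantics).
def Pre_partition_multilevel (farm_names : List String) (food_names : List String) (group_size : Int) : Prop :=
  1 ≤ group_size
instance (farm_names : List String) (food_names : List String) (group_size : Int) : Decidable (Pre_partition_multilevel farm_names food_names group_size) := by unfold Pre_partition_multilevel; infer_instance
def pvWitness_partition_multilevel : List String × List String × Int := (["f1", "f2", "f3"], ["c1", "c2"], 2)

def Spec_partition_multilevel (farm_names : List String) (food_names : List String) (group_size : Int) (out : List (List String)) : Prop := out = partition_multilevel_alt farm_names food_names group_size
instance (farm_names : List String) (food_names : List String) (group_size : Int) (out : List (List String)) : Decidable (Spec_partition_multilevel farm_names food_names group_size out) := by unfold Spec_partition_multilevel; infer_instance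

-- ===== CLAIM (what is proved, stated in full; the proofs are below) =====
def Claim_equal_partition_multilevel : Prop := ∀ (farm_names : List String) (food_names : List String) (group_size : Int), Dom_partition_multilevel farm_names food_names group_size → Pre_partition_multilevel farm_names food_names group_size → Spec_partition_multilevel farm_names food_names group_size (partition_multilevel farm_names food_names group_size)

-- ===== LEMMAS AND PROOFS =====

-- chunks of size k+1, last one possibly shorter (the common shape both ports compute)
def pvChunk {α : Type} (k : Nat) : List α → List (List α)
  | [] => []
  | x :: xs => (x :: xs.take k) :: pvChunk k (xs.drop k)
  termination_by xs => xs.length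
  decreasing_by simp

theorem pvChunk_short {α : Type} (k : Nat) (c : List α) (hc : c.length ≤ k + 1) :
    pvChunk k c = if c.isEmpty then [] else [c] := by
  cases c with
  | nil => rw [pvChunk]; rfl
  | cons x t =>
      have ht : t.length ≤ k := by simpa using hc
      rw [pvChunk, List.take_of_length_le ht, List.drop_eq_nil_of_le ht, pvChunk]
      rfl

theorem pvChunk_full {α : Type} (k : Nat) (c ys : List α) (hc : c.length = k + 1) :
    pvChunk k (c ++ ys) = c :: pvChunk k ys := by
  cases c with
  | nil => simp at hc
  | cons x t =>
      have ht : t.length = k := by simpa using hc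
      rw [List.cons_append, pvChunk, ← ht, List.take_left, List.drop_left]

theorem pvChunk_eq_map_range {α : Type} (k : Nat) (xs : List α) :
    (List.range ((xs.length + k) / (k + 1))).map (fun j => (xs.drop ((k + 1) * j)).take (k + 1))
      = pvChunk k xs := by
  generalize hn : xs.length = n
  induction n using Nat.strong_induction_on generalizing xs with
  | _ n ih =>
    cases xs with
    | nil =>
      subst hn
      rw [pvChunk]
      simp
    | cons x t =>
      subst hn
      rw [pvChunk]
      have hM : ((x :: t).length + k) / (k + 1) = t.length / (k + 1) + 1 := by
        rw [List.length_cons, show t.length + 1 + k = t.length + (k + 1) by omega,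
          Nat.add_div_right _ (Nat.succ_pos k)]
      rw [hM, List.range_succ_eq_map, List.map_cons, List.map_map]
      congr 1
      have hfun : ((fun j => ((x :: t).drop ((k + 1) * j)).take (k + 1)) ∘ Nat.succ)
          = (fun j => (((t.drop k).drop ((k + 1) * j))).take (k + 1)) := by
        funext j
        have hdrop : (x :: t).drop ((k + 1) * (j + 1)) = (t.drop k).drop ((k + 1) * j) := by
          rw [List.drop_drop, show (k + 1) * (j + 1) = ((k + 1) * j + k) + 1 by ring,
            List.drop_succ_cons]
          congr 1
          omega
        simp only [Function.comp_apply, Nat.succ_eq_add_one, hdrop]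
      have hcnt : t.length / (k + 1) = ((t.drop k).length + k) / (k + 1) := by
        by_cases h : k ≤ t.length
        · simp [Nat.sub_add_cancel h]
        · rw [List.drop_eq_nil_of_le (by omega)]
          simp [Nat.div_eq_of_lt (show t.length < k + 1 by omega),
            Nat.div_eq_of_lt (show k < k + 1 by omega)]
      rw [hfun, hcnt]
      exact ih (t.drop k).length (by simp) (t.drop k) rfl

theorem pvCount_eq (k n : Nat) :
    (if (0 : Int) < (n : Int) then (((n : Int) - 0 + ((k + 1 : Nat) : Int) - 1) / ((k + 1 : Nat) : Int)).toNat else 0)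
      = (n + k) / (k + 1) := by
  cases n with
  | zero => simp [Nat.div_eq_of_lt (Nat.lt_succ_self k)]
  | succ m =>
      rw [if_pos (by exact_mod_cast Nat.succ_pos m)]
      have h1 : ((m + 1 : Nat) : Int) - 0 + ((k + 1 : Nat) : Int) - 1 = ((m + 1 + k : Nat) : Int) := by
        push_cast; ring
      rw [h1]
      rw [← Int.natCast_ediv]
      rw [Int.toNat_natCast]

theorem pvFoldB_eq (k : Nat) (h : List String → List String) :
    ∀ (xs cur : List String) (parts : List (List String)), cur.length ≤ k →
    (let st := xs.foldl
        (fun (st : List (List String) × List String) f =>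
          let current := st.2 ++ [f]
          if (current.length : Int) = ((k + 1 : Nat) : Int) then (st.1 ++ [h current], ([] : List String))
          else (st.1, current))
        (parts, cur)
     (if st.2.isEmpty then st.1 else st.1 ++ [h st.2])) = parts ++ (pvChunk k (cur ++ xs)).map h := by
  intro xs
  induction xs with
  | nil =>
      intro cur parts hc
      simp only [List.foldl_nil, List.append_nil]
      rw [pvChunk_short k cur (by omega)]
      cases cur with
      | nil => simp
      | cons c cs => simp
  | cons f rest ih =>
      intro cur parts hc
      simp only [List.foldl_cons]
      by_cases hfull : cur.length + 1 = k + 1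
      · have hcond : (((cur ++ [f]).length : Nat) : Int) = ((k + 1 : Nat) : Int) := by
          rw [List.length_append]
          exact_mod_cast (by omega : cur.length + 1 = k + 1)
        rw [if_pos hcond]
        have hrec := ih [] (parts ++ [h (cur ++ [f])]) (Nat.zero_le k)
        simp only [List.nil_append] at hrec
        rw [hrec]
        rw [show cur ++ f :: rest = (cur ++ [f]) ++ rest by simp]
        rw [pvChunk_full k (cur ++ [f]) rest (by simp; omega)]
        simp
      · have hcond : ¬ ((((cur ++ [f]).length : Nat) : Int) = ((k + 1 : Nat) : Int)) := by
          rw [List.length_append]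
          intro hh
          exact hfull (by exact_mod_cast hh)
        rw [if_neg hcond]
        have hrec := ih (cur ++ [f]) parts (by simp; omega)
        simp only [] at hrec
        rw [hrec]
        rw [show cur ++ f :: rest = (cur ++ [f]) ++ rest by simp]

theorem pvKey (farm_names food_names : List String) (k : Nat) :
    partition_multilevel farm_names food_names ((k + 1 : Nat) : Int)
      = partition_multilevel_alt farm_names food_names ((k + 1 : Nat) : Int) := by
  have hg : (0 : Int) < ((k + 1 : Nat) : Int) := by exact_mod_cast Nat.succ_pos k
  have hB := pvFoldB_eq k (pvYGroup food_names) farm_names [] [] (Nat.zero_le k)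
  simp only [List.nil_append] at hB
  simp only [partition_multilevel, partition_multilevel_alt]
  rw [PySem.List.pyRange_of_pos 0 (farm_names.length : Int) hg]
  rw [PySem.List.foldl_append_singleton_eq_map]
  rw [List.map_map, pvCount_eq k farm_names.length]
  rw [hB]
  congr 1
  have hfun : ((fun i => pvYGroup food_names (PySem.List.slice farm_names (some i) (some (i + ((k + 1 : Nat) : Int))))) ∘ (fun j : Nat => 0 + ((k + 1 : Nat) : Int) * (j : Int)))
      = (fun j : Nat => pvYGroup food_names ((farm_names.drop ((k + 1) * j)).take (k + 1))) := by
    funext j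
    simp only [Function.comp_apply]
    congr 1
    have h1 : (0 : Int) + ((k + 1 : Nat) : Int) * (j : Int) = (((k + 1) * j : Nat) : Int) := by
      push_cast; ring
    rw [h1, PySem.List.slice_natCast_add]
  rw [hfun, ← pvChunk_eq_map_range k farm_names, List.map_map]
  simp only [List.nil_append]
  rfl

-- ===== VERDICT (by name: the statement is the Claim_ definition above) =====
theorem partition_multilevel_spec : Claim_equal_partition_multilevel := by
  intro farm_names food_names group_size _hd hp
  unfold Spec_partition_multilevel
  obtain ⟨k, rfl⟩ : ∃ k : Nat, group_size = ((k + 1 : Nat) : Int) :=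
    ⟨(group_size - 1).toNat, by unfold Pre_partition_multilevel at hp; push_cast; omega⟩
  exact pvKey farm_names food_names k
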